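-- pv_equiv track=rewrite | github.com/matt-hayden/pyxz | Aquacraft/numpy_table_iterators.py | sumas_lookup
-- ===== SOURCE A (Python) =====
-- def sumas_lookup(text):
-- 	"""
-- 	Some @ events mistakenly made it into the database
-- 	"""
-- 	if not text:
-- 		return ''
-- 	if text.startswith('Clotheswashe'):
-- 		return 'Clothes washer'
-- 	if text.endswith('@'):
-- 		return sumas_lookup(text.replace('@','').strip())
-- 	return text
-- ===== SOURCE B (Python) =====
-- def sumas_lookup(text):
--     if not text:
--         return ''
--     if text.startswith('Clotheswashe'):
--         return 'Clothes washer'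
--     if not text.endswith('@'):
--         return text
--     # replace removes every '@', so the cleaned text can never end with '@'
--     # again: one unrolled re-check replaces A's recursion.
--     t = text.replace('@', '').strip()
--     if not t:
--         return ''
--     if t.startswith('Clotheswashe'):
--         return 'Clothes washer'
--     return t
-- ===== Notes on version B (the rewrite author's own statement) =====
-- stated objective: simpler
-- what changed: Replaces A's recursion with a single unrolled re-check: since replace('@','') removes every '@', the cleaned text can never end with '@' again, so one pass of the guards after cleaning suffices and the function becomes non-recursive.
import Mathlib
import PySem

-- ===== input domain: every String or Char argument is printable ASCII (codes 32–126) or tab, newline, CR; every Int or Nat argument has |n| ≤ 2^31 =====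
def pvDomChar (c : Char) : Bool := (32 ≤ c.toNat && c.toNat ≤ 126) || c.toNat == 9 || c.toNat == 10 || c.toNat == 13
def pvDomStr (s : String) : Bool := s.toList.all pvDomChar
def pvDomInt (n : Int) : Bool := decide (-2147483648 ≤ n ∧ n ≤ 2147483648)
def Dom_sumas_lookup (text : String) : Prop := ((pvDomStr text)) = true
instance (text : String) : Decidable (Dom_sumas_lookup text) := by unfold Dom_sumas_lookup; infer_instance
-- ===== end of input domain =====

-- B replaces A's recursion with one unrolled re-check (after replace('@','') the
-- text can never end with '@' again), making the function non-recursive; objective: simpler.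

-- helper facts cited by port A's decreasing_by: replace "@" -> "" is a filter,
-- strip is a sublist, hence the recursive argument is strictly shorter.
lemma pvGoFilter : ∀ (l acc : List Char) (fuel : Nat), l.length ≤ fuel →
    PySem.Chars.replace.go ['@'] [] fuel l acc = acc.reverse ++ l.filter (fun c => c != '@') := by
  intro l
  induction l with
  | nil =>
    intro acc fuel _
    cases fuel <;> simp [PySem.Chars.replace.go]
  | cons c t ih =>
    intro acc fuel h
    cases fuel with
    | zero => simp at h
    | succ f =>
      by_cases hc : c = '@'
      · subst hc
        simpa [PySem.Chars.replace.go, List.isPrefixOf] using ih acc f (by simpa using h)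
      · simpa [PySem.Chars.replace.go, List.isPrefixOf, hc, Ne.symm hc]
          using ih (c::acc) f (by simpa using h)

lemma pvReplaceAtFilter (cs : List Char) :
    PySem.Chars.replace cs ['@'] [] = cs.filter (fun c => c != '@') := by
  simpa [PySem.Chars.replace] using pvGoFilter cs [] cs.length le_rfl

lemma pvStripSublist (l : List Char) : (PySem.Chars.strip l).Sublist l := by
  unfold PySem.Chars.strip PySem.Chars.rstrip PySem.Chars.lstrip
  have h1 := List.Sublist.reverse
    (List.dropWhile_sublist (p := PySem.Chars.isspace)
      (l := (List.dropWhile PySem.Chars.isspace l).reverse))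
  rw [List.reverse_reverse] at h1
  exact h1.trans (List.dropWhile_sublist _)

lemma pvStripReplaceLen (text : String) (h : PySem.Str.endswith text "@" = true) :
    (PySem.Str.strip (PySem.Str.replace text "@" "")).length < text.length := by
  have h1 : ('@' : Char) ∈ text.toList := by
    have := (PySem.Chars.endswith_iff (s := text.toList) (p := ['@'])).mp (by simpa using h)
    exact (List.IsSuffix.subset this) (by simp)
  have h2 : (PySem.Chars.strip (PySem.Chars.replace text.toList ['@'] [])).length
      < text.toList.length := by
    calc (PySem.Chars.strip (PySem.Chars.replace text.toList ['@'] [])).length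
        ≤ (PySem.Chars.replace text.toList ['@'] []).length :=
          (pvStripSublist _).length_le
      _ < text.toList.length := by
          rw [pvReplaceAtFilter]
          exact List.length_filter_lt_length_iff_exists.mpr ⟨'@', h1, by simp⟩
  have h3 : (PySem.Str.strip (PySem.Str.replace text "@" "")).toList.length
      < text.toList.length := by
    simpa [PySem.Str.toList_strip, PySem.Str.toList_replace] using h2
  rwa [String.length_toList, String.length_toList] at h3

-- ===== PORT A =====
def sumas_lookup (text : String) : String :=
  if text = "" then ""
  else if PySem.Str.startswith text "Clotheswashe" then "Clothes washer"
  else if h : PySem.Str.endswith text "@" then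
    sumas_lookup (PySem.Str.strip (PySem.Str.replace text "@" ""))
  else text
termination_by text.length
decreasing_by exact pvStripReplaceLen text h

-- ===== PORT B =====
def sumas_lookup_alt (text : String) : String :=
  if text = "" then ""
  else if PySem.Str.startswith text "Clotheswashe" then "Clothes washer"
  else if !PySem.Str.endswith text "@" then text
  else
    let t := PySem.Str.strip (PySem.Str.replace text "@" "")
    if t = "" then ""
    else if PySem.Str.startswith t "Clotheswashe" then "Clothes washer"
    else t

-- ===== PRECONDITION & SPEC =====
def Spec_sumas_lookup (text : String) (out : String) : Prop := out = sumas_lookup_alt text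
instance (text : String) (out : String) : Decidable (Spec_sumas_lookup text out) := by unfold Spec_sumas_lookup; infer_instance

-- ===== CLAIM (what is proved, stated in full; the proofs are below) =====
def Claim_equal_sumas_lookup : Prop := ∀ (text : String), Dom_sumas_lookup text → Spec_sumas_lookup text (sumas_lookup text)

-- ===== LEMMAS AND PROOFS =====

-- the cleaned text contains no '@', hence cannot end with '@'
lemma pvCleanNoAt (text : String) :
    PySem.Str.endswith (PySem.Str.strip (PySem.Str.replace text "@" "")) "@" = false := by
  rw [Bool.eq_false_iff]
  intro h
  have h1 : ('@' : Char) ∈ (PySem.Str.strip (PySem.Str.replace text "@" "")).toList := by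
    have := (PySem.Chars.endswith_iff
        (s := (PySem.Str.strip (PySem.Str.replace text "@" "")).toList) (p := ['@'])).mp
        (by simpa using h)
    exact (List.IsSuffix.subset this) (by simp)
  rw [PySem.Str.toList_strip, PySem.Str.toList_replace] at h1
  have h2 : ('@' : Char) ∈ PySem.Chars.replace text.toList ['@'] [] :=
    (pvStripSublist _).subset (by simpa using h1)
  rw [pvReplaceAtFilter] at h2
  simp at h2

-- ===== VERDICT (by name: the statement is the Claim_ definition above) =====
theorem sumas_lookup_spec : Claim_equal_sumas_lookup := by
  intro text _
  unfold Spec_sumas_lookup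
  rw [sumas_lookup, sumas_lookup_alt]
  by_cases h0 : text = ""
  · rw [if_pos h0, if_pos h0]
  rw [if_neg h0, if_neg h0]
  by_cases h1 : PySem.Str.startswith text "Clotheswashe" = true
  · rw [if_pos h1, if_pos h1]
  rw [if_neg h1, if_neg h1]
  by_cases h2 : PySem.Str.endswith text "@" = true
  · rw [dif_pos h2, h2]
    simp only [Bool.not_true, Bool.false_eq_true, if_false]
    rw [sumas_lookup]
    by_cases h3 : PySem.Str.strip (PySem.Str.replace text "@" "") = ""
    · rw [if_pos h3, if_pos h3]
    rw [if_neg h3, if_neg h3]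
    by_cases h4 : PySem.Str.startswith (PySem.Str.strip (PySem.Str.replace text "@" "")) "Clotheswashe" = true
    · rw [if_pos h4, if_pos h4]
    rw [if_neg h4, if_neg h4, dif_neg (by simp only [Bool.not_eq_true]; exact pvCleanNoAt text)]
  · have h2' : PySem.Str.endswith text "@" = false := by simpa using h2
    rw [dif_neg h2, h2']
    simp only [Bool.not_false, if_pos]
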